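-- pv_equiv track=rewrite | github.com/mimi6612/at_coder | atcoder_beginners_section/practice_k.py | can_travel
-- ===== SOURCE A (Python) =====
-- def can_travel(from_point, to_point, time):
--     move_x = to_point[0] - from_point[0]
--     move_y = to_point[1] - from_point[1]
--     sum_move = move_x + move_y
--
--     array_sum = []
--     for i in range(time + 1):
--         array_sum.append(time - 2 * i)
--     if(sum_move in array_sum):
--         return True
--     else:
--         return False
-- ===== SOURCE B (Python) =====
-- def can_travel(from_point, to_point, time):
--     sum_move = (to_point[0] - from_point[0]) + (to_point[1] - from_point[1])
--     return time >= 0 and abs(sum_move) <= time and (time - sum_move) % 2 == 0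
-- ===== Notes on version B (the rewrite author's own statement) =====
-- stated objective: simpler
-- what changed: Replaced the loop that materialises the list [time-2i for i in 0..time] and does a linear membership test with a closed-form parity-and-range check (time >= 0, |sum_move| <= time, time-sum_move even).
import Mathlib
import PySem

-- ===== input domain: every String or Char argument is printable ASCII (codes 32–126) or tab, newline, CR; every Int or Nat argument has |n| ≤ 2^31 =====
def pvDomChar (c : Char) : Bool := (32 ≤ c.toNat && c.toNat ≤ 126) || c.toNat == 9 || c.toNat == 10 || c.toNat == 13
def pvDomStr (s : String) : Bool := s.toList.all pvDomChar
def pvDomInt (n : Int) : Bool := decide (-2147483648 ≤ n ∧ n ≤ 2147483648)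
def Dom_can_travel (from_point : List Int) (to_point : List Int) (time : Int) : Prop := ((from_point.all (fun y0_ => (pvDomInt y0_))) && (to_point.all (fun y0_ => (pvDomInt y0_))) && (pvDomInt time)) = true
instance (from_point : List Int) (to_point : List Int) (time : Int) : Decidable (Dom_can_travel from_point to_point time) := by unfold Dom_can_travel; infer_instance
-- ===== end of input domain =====

-- B replaces A's materialised list [time-2i] and membership scan with a closed-form
-- parity-and-range check; equivalence of return values proved on Pre_ (both points have >= 2 coordinates).
-- ===== PORT A =====
def can_travel (from_point : List Int) (to_point : List Int) (time : Int) : Bool :=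
  match PySem.List.pyGet? to_point 0, PySem.List.pyGet? from_point 0,
        PySem.List.pyGet? to_point 1, PySem.List.pyGet? from_point 1 with
  | some t0, some f0, some t1, some f1 =>
    let move_x := t0 - f0
    let move_y := t1 - f1
    let sum_move := move_x + move_y
    let array_sum := (PySem.List.pyRange 0 (time + 1) 1).foldl (fun acc i => acc ++ [time - 2 * i]) []
    if sum_move ∈ array_sum then true else false
  | _, _, _, _ => false  -- IndexError in Python: excluded by Pre_

-- ===== PORT B =====
def can_travel_alt (from_point : List Int) (to_point : List Int) (time : Int) : Bool :=
  ((PySem.List.pyGet? to_point 0).bind fun t0 =>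
   (PySem.List.pyGet? from_point 0).bind fun f0 =>
   (PySem.List.pyGet? to_point 1).bind fun t1 =>
   (PySem.List.pyGet? from_point 1).map fun f1 =>
     let sum_move := (t0 - f0) + (t1 - f1)
     decide (0 ≤ time) && decide (|sum_move| ≤ time) && (PySem.Int.mod (time - sum_move) 2 == 0)
  ).getD false  -- none = IndexError in Python: excluded by Pre_

-- ===== PRECONDITION & SPEC =====
-- Pre_ excludes exactly the inputs where Python A raises IndexError (a point with fewer than 2 coordinates).
def Pre_can_travel (from_point : List Int) (to_point : List Int) (time : Int) : Prop :=
  2 ≤ from_point.length ∧ 2 ≤ to_point.length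
instance (from_point : List Int) (to_point : List Int) (time : Int) : Decidable (Pre_can_travel from_point to_point time) := by unfold Pre_can_travel; infer_instance
def pvWitness_can_travel : List Int × List Int × Int := ([0, 0], [1, 2], 3)
def Spec_can_travel (from_point : List Int) (to_point : List Int) (time : Int) (out : Bool) : Prop := out = can_travel_alt from_point to_point time
instance (from_point : List Int) (to_point : List Int) (time : Int) (out : Bool) : Decidable (Spec_can_travel from_point to_point time out) := by unfold Spec_can_travel; infer_instance

-- ===== CLAIM (what is proved, stated in full; the proofs are below) =====
def Claim_equal_can_travel : Prop := ∀ (from_point : List Int) (to_point : List Int) (time : Int), Dom_can_travel from_point to_point time → Pre_can_travel from_point to_point time → Spec_can_travel from_point to_point time (can_travel from_point to_point time)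

-- ===== LEMMAS AND PROOFS =====
lemma pyGet?_one_cons_cons (a b : Int) (xs : List Int) :
    PySem.List.pyGet? (a :: b :: xs) 1 = some b := by
  simp [PySem.List.pyGet?, PySem.List.pyIdx?,
    show (1:Int) < ((xs.length:Int) + 1 + 1) from by omega]

lemma key_mem (time s : Int) :
    (s ∈ (PySem.List.pyRange 0 (time + 1) 1).map (fun i => time - 2 * i)) ↔
    (0 ≤ time ∧ |s| ≤ time ∧ (time - s) % 2 = 0) := by
  simp only [List.mem_map, PySem.List.mem_pyRange_one, abs_le]
  constructor
  · rintro ⟨i, ⟨h0, h1⟩, rfl⟩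
    omega
  · rintro ⟨h0, ⟨hl, hr⟩, hm⟩
    exact ⟨(time - s) / 2, by omega, by omega⟩

-- ===== VERDICT (by name: the statement is the Claim_ definition above) =====
theorem can_travel_spec : Claim_equal_can_travel := by
  intro from_point to_point time _ hpre
  obtain ⟨hf, ht⟩ := hpre
  match from_point, to_point with
  | f0 :: f1 :: fr, t0 :: t1 :: tr =>
    unfold Spec_can_travel can_travel can_travel_alt
    rw [PySem.List.pyGet?_zero_cons, PySem.List.pyGet?_zero_cons,
        pyGet?_one_cons_cons, pyGet?_one_cons_cons]
    dsimp only [Option.bind, Option.map, Option.getD]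
    simp only [PySem.List.foldl_append_singleton_eq_map, List.nil_append]
    set s := t0 - f0 + (t1 - f1) with hs
    rw [PySem.Int.mod_eq_emod_of_pos (by norm_num)]
    by_cases h : s ∈ (PySem.List.pyRange 0 (time + 1) 1).map (fun i => time - 2 * i)
    · have hc := (key_mem time s).mp h
      simp [h, hc.1, hc.2.1, hc.2.2]
    · have hnc := fun hc => h ((key_mem time s).mpr hc)
      simp only [h, Bool.false_eq, if_false]
      by_contra hb
      simp only [Bool.and_eq_true, decide_eq_true_eq, beq_iff_eq,
        Bool.not_eq_false] at hb
      exact hnc ⟨hb.1.1, hb.1.2, hb.2⟩
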